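-- pv_equiv track=rewrite | github.com/ohsuz/D-ai-ving | Algorithms/메뉴 리뉴얼/menu_renewal_suzie.py | solution
-- ===== SOURCE A (Python) =====
-- from itertools import combinations
--
-- def solution(orders, course):
--     answer = []
--     menu, comb, max_order = {}, {}, {}
--
--     # 1. orders에서 가능한 코스별 인덱스 조합들을 미리 comb 딕셔너리에 저장
--     for i in set([len(order) for order in orders]):
--         for c in course:
--             if i >= c:
--                 comb[(i, c)] = list(combinations(list(range(i)), c))
--
--     # 2-1. 각 주문별로 만들 수 있는 코스 조합들을 menu 딕셔너리에 저장하고 count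
--     # 2-2. count한 수가 동일 단품메뉴 개수를 가진 코스 中 최대이면 max_order 딕셔너리에 업데이트
--     for order in orders:
--         for c in course:
--             if len(order) >= c:
--                 for cb in comb[(len(order), c)]:
--                     new = ''.join(sorted([order[i] for i in cb]))
--                     menu[new] = menu.get(new, 0) + 1
--                     if menu[new] > max_order.get(len(new), 0):
--                         max_order[len(new)] = menu[new]
--
--     # 4. 코스의 단품메뉴가 2개 이상이고
--     #    코스의 주문 개수가 동일 단품메뉴 개수 코스 中 최대이면 정답
--     for m in menu:
--         if menu[m] >= 2 and menu[m] == max_order[len(m)]: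
--             answer.append(m)
--
--     return sorted(answer)
-- ===== SOURCE B (Python) =====
-- from itertools import combinations
--
-- def solution(orders, course):
--     # All course-sized character combinations, gathered into one flat list.
--     keys = []
--     for order in orders:
--         s = ''.join(sorted(order))
--         for c in course:
--             if c <= len(s):
--                 for cb in combinations(s, c):
--                     keys.append(''.join(cb))
--     # Sort once, then run-length encode the grouped keys (no counting dict).
--     keys.sort()
--     runs = []
--     for k in keys:
--         if runs and runs[-1][0] == k:
--             runs[-1] = (k, runs[-1][1] + 1)
--         else:
--             runs.append((k, 1))
--     # Per-length best counts, then winners in already-sorted order.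
--     best = {}
--     for k, cnt in runs:
--         if cnt > best.get(len(k), 0):
--             best[len(k)] = cnt
--     return [k for k, cnt in runs if cnt >= 2 and cnt == best[len(k)]]
-- ===== Notes on version B (the rewrite author's own statement) =====
-- stated objective: alternative
-- what changed: B replaces A's precomputed index-combination table and the hash-dict counting with incremental max tracking by a sort-then-scan pipeline: it flattens all generated combinations into one list, sorts it once, run-length encodes the grouped keys, and resolves per-size maxima and winners in separate scans over the runs, emitting the answer already in sorted order with no counting dict and no final sort.
import Mathlib
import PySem

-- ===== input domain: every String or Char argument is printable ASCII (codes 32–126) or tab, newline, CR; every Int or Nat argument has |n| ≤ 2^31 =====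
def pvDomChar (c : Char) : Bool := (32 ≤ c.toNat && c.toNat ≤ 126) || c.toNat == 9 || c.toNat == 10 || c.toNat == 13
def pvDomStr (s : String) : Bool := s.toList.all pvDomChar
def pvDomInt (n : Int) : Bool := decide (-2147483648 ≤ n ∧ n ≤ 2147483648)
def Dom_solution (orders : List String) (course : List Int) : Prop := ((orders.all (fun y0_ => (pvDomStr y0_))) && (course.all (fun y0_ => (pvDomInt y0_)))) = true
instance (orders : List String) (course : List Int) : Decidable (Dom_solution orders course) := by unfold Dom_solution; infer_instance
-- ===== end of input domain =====

-- B replaces A's comb-index table + counting dict + incremental max by a flatten → sort once →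
-- run-length-encode → per-size max scan pipeline (return value only; no observable mutation).


-- ===== PORT A =====
-- strings are handled on their List Char side throughout (PySem convention); keys of `menu`
-- are the List Char form of A's joined strings, re-wrapped with String.mk at the very end.
def solution (orders : List String) (course : List Int) : List String :=
  let ords : List (List Char) := orders.map String.toList
  -- 1. comb[(i, c)] = list(combinations(list(range(i)), c))
  let lens : List Int := PySem.Set.ofList (ords.map (fun o => PySem.List.len o))
  let comb : PySem.Dict (Int × Int) (List (List Int)) :=
    lens.foldl (fun d i =>
      course.foldl (fun d c =>
        if c ≤ i then d.insert (i, c) (PySem.List.combinations (PySem.List.pyRange 0 i 1) c.toNat) else d) d)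
      PySem.Dict.empty
  -- 2. count every generated course string, tracking the running per-length maximum
  let st : PySem.Dict (List Char) Int × PySem.Dict Int Int :=
    ords.foldl (fun st o =>
      course.foldl (fun st c =>
        if c ≤ PySem.List.len o then
          ((comb.get? (PySem.List.len o, c)).getD []).foldl (fun st cb =>
            let nw : List Char := PySem.List.sorted (cb.map (fun j => PySem.List.pyGetD o j ' ')) (fun x => x) false
            let mn := st.1.insert nw (st.1.getD nw 0 + 1)
            (mn, if mn.getD nw 0 > st.2.getD (PySem.List.len nw) 0
                 then st.2.insert (PySem.List.len nw) (mn.getD nw 0) else st.2)) st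
        else st) st)
      (PySem.Dict.empty, PySem.Dict.empty)
  -- 4. keep the courses ordered at least twice whose count is the per-length maximum
  let answer : List (List Char) :=
    st.1.keys.foldl (fun acc m =>
      if 2 ≤ st.1.getD m 0 ∧ st.1.getD m 0 = st.2.getD (PySem.List.len m) 0 then acc ++ [m] else acc) []
  (@PySem.List.sorted (List Char) (List Char) List.instLinearOrder.toLT LinearOrder.toDecidableLT answer (fun x => x) false).map (fun cs => String.ofList cs)

-- ===== PORT B =====
-- keys.sort() is ported as the standard library's stable sort (same result as sorted())
def ksort (xs : List (List Char)) : List (List Char) := xs.mergeSort (fun a b => decide (a ≤ b))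
def solution_alt (orders : List String) (course : List Int) : List String :=
  -- one flat list of every generated combination (combinations of the sorted characters)
  let keys : List (List Char) :=
    orders.foldl (fun acc order =>
      let s : List Char := PySem.List.sorted order.toList (fun x => x) false
      course.foldl (fun acc c =>
        if c ≤ PySem.List.len s then acc ++ PySem.List.combinations s c.toNat else acc) acc) []
  -- sort once, then run-length encode the grouped keys
  let ks : List (List Char) := ksort keys
  let runs : List (List Char × Int) :=
    ks.foldl (fun rs k =>
      match rs.getLast? with
      | some last => if last.1 = k then rs.dropLast ++ [(k, last.2 + 1)] else rs ++ [(k, 1)]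
      | none => rs ++ [(k, 1)]) []
  -- per-length best counts, then winners in already-sorted order
  let best : PySem.Dict Int Int :=
    runs.foldl (fun b p =>
      if p.2 > b.getD (PySem.List.len p.1) 0 then b.insert (PySem.List.len p.1) p.2 else b)
      PySem.Dict.empty
  ((runs.filter (fun p : List Char × Int => decide (2 ≤ p.2 ∧ p.2 = best.getD (PySem.List.len p.1) 0))).map (fun p => p.1)).map
    (fun cs => String.ofList cs)

-- ===== PRECONDITION & SPEC =====
-- Pre_ excludes exactly the inputs on which A raises ValueError (a negative course size with at
-- least one order present reaches combinations with negative r); B raises there too.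
def Pre_solution (orders : List String) (course : List Int) : Prop :=
  orders = [] ∨ ∀ c ∈ course, 0 ≤ c
instance (orders : List String) (course : List Int) : Decidable (Pre_solution orders course) := by unfold Pre_solution; infer_instance
def pvWitness_solution : List String × List Int := (["ABC", "BC", "CBA"], [2, 3])

def Spec_solution (orders : List String) (course : List Int) (out : List String) : Prop := out = solution_alt orders course
instance (orders : List String) (course : List Int) (out : List String) : Decidable (Spec_solution orders course out) := by unfold Spec_solution; infer_instance

-- ===== CLAIM (what is proved, stated in full; the proofs are below) =====
def Claim_equal_solution : Prop := ∀ (orders : List String) (course : List Int), Dom_solution orders course → Pre_solution orders course → Spec_solution orders course (solution orders course)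

-- ===== LEMMAS AND PROOFS =====

-- ---- shared abbreviations for the proofs (not used by the ports) ----
def sortKey (cs : List Char) : List Char := PySem.List.sorted cs (fun x => x) false
def sortLL (xs : List (List Char)) : List (List Char) :=
  @PySem.List.sorted (List Char) (List Char) List.instLinearOrder.toLT LinearOrder.toDecidableLT xs (fun x => x) false
def chunkA (o : List Char) (c : Int) : List (List Char) :=
  if c ≤ PySem.List.len o then
    (PySem.List.combinations (PySem.List.pyRange 0 (PySem.List.len o) 1) c.toNat).map
      (fun cb => sortKey (cb.map (fun j => PySem.List.pyGetD o j ' ')))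
  else []
def chunkB (o : List Char) (c : Int) : List (List Char) :=
  if c ≤ PySem.List.len (sortKey o) then PySem.List.combinations (sortKey o) c.toNat else []
def streamA (orders : List String) (course : List Int) : List (List Char) :=
  orders.flatMap (fun od => course.flatMap (fun c => chunkA od.toList c))
def streamB (orders : List String) (course : List Int) : List (List Char) :=
  orders.flatMap (fun od => course.flatMap (fun c => chunkB od.toList c))
def stepA (st : PySem.Dict (List Char) Int × PySem.Dict Int Int) (nw : List Char) :
    PySem.Dict (List Char) Int × PySem.Dict Int Int :=
  let mn := st.1.insert nw (st.1.getD nw 0 + 1)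
  (mn, if mn.getD nw 0 > st.2.getD (PySem.List.len nw) 0
       then st.2.insert (PySem.List.len nw) (mn.getD nw 0) else st.2)
def stepR (rs : List (List Char × Int)) (k : List Char) : List (List Char × Int) :=
  match rs.getLast? with
  | some last => if last.1 = k then rs.dropLast ++ [(k, last.2 + 1)] else rs ++ [(k, 1)]
  | none => rs ++ [(k, 1)]
def stepBest (b : PySem.Dict Int Int) (p : List Char × Int) : PySem.Dict Int Int :=
  if p.2 > b.getD (PySem.List.len p.1) 0 then b.insert (PySem.List.len p.1) p.2 else b
def combF (p : Int × Int) : List (List Int) :=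
  PySem.List.combinations (PySem.List.pyRange 0 p.1 1) p.2.toNat

-- ---- sortKey / sortLL basics ----
lemma sortKey_perm (cs : List Char) : (sortKey cs).Perm cs := PySem.List.sorted_perm cs _ _
lemma sortKey_pairwise (cs : List Char) : (sortKey cs).Pairwise (· ≤ ·) :=
  PySem.List.sorted_pairwise cs (fun x => x)
lemma sortKey_eq_self {cs : List Char} (h : cs.Pairwise (· ≤ ·)) : sortKey cs = cs :=
  PySem.List.sorted_eq_self_of_pairwise cs (fun x => x) h
lemma sortLL_eq_of_perm_of_pairwise_lt {xs ys : List (List Char)} (h : ys.Perm xs)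
    (hp : ys.Pairwise (· < ·)) : sortLL xs = ys :=
  @PySem.List.sorted_eq_of_perm_of_pairwise_lt (List Char) (List Char) List.instLinearOrder xs ys (fun x => x) h hp

lemma ksort_perm (xs : List (List Char)) : (ksort xs).Perm xs := List.mergeSort_perm xs _
lemma ksort_pairwise (xs : List (List Char)) : (ksort xs).Pairwise (· ≤ ·) := by
  have h := List.pairwise_mergeSort (le := fun a b : List Char => decide (a ≤ b))
    (by intro a b c hab hbc; simp at *; exact le_trans hab hbc)
    (by intro a b; simp; exact le_total a b) xs
  refine h.imp ?_
  intro a b hab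
  simpa using hab

-- ---- the multiset of sorted combinations is invariant under permuting the base list ----
lemma sortKey_eq_msort (cs : List Char) :
    sortKey cs = Multiset.sort (↑cs : Multiset Char) (· ≤ ·) := by
  apply PySem.List.eq_of_perm_of_pairwise_le
  · exact (sortKey_perm cs).trans (Multiset.coe_eq_coe.mp (Multiset.sort_eq ((cs : Multiset Char)) (· ≤ ·))).symm
  · exact sortKey_pairwise cs
  · exact Multiset.pairwise_sort ((cs : Multiset Char)) (· ≤ ·)
lemma combinations_perm_sublistsLen {α : Type} (l : List α) (r : Nat) :
    (PySem.List.combinations l r).Perm (l.sublistsLen r) := by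
  induction l generalizing r with
  | nil => cases r <;> simp [PySem.List.combinations_zero, PySem.List.combinations_nil_succ]
  | cons x xs ih =>
    cases r with
    | zero => simp [PySem.List.combinations_zero]
    | succ n =>
      rw [PySem.List.combinations_cons_succ, List.sublistsLen_succ_cons]
      exact (((ih n).map _).append (ih (n+1))).trans List.perm_append_comm
lemma coe_map_sortKey_combinations (l : List Char) (r : Nat) :
    (↑((PySem.List.combinations l r).map sortKey) : Multiset (List Char))
      = Multiset.map (fun m : Multiset Char => Multiset.sort m (· ≤ ·)) (Multiset.powersetCard r (↑l : Multiset Char)) := by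
  have h1 : (↑((PySem.List.combinations l r).map sortKey) : Multiset (List Char))
      = ↑((l.sublistsLen r).map sortKey) :=
    Multiset.coe_eq_coe.mpr ((combinations_perm_sublistsLen l r).map _)
  rw [h1, Multiset.powersetCard_coe, Multiset.map_coe, List.map_map]
  apply Multiset.coe_eq_coe.mpr
  apply List.Perm.of_eq
  apply List.map_congr_left
  intro a _
  exact sortKey_eq_msort a
lemma map_sortKey_combinations_perm (l₁ l₂ : List Char) (r : Nat) (h : l₁.Perm l₂) :
    ((PySem.List.combinations l₁ r).map sortKey).Perm ((PySem.List.combinations l₂ r).map sortKey) := by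
  rw [← Multiset.coe_eq_coe, coe_map_sortKey_combinations, coe_map_sortKey_combinations,
    Multiset.coe_eq_coe.mpr h]
lemma chunk_perm (o : List Char) (c : Int) : (chunkA o c).Perm (chunkB o c) := by
  unfold chunkA chunkB
  have hlen : PySem.List.len (sortKey o) = PySem.List.len o := by
    rw [PySem.List.len_eq, PySem.List.len_eq]
    exact_mod_cast (sortKey_perm o).length_eq
  rw [hlen]
  by_cases hc : c ≤ PySem.List.len o
  · rw [if_pos hc, if_pos hc]
    have h1 : (PySem.List.combinations (PySem.List.pyRange 0 (PySem.List.len o) 1) c.toNat).map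
        (fun cb => sortKey (cb.map (fun j => PySem.List.pyGetD o j ' ')))
        = (PySem.List.combinations o c.toNat).map sortKey := by
      conv_rhs => rw [← PySem.List.map_pyGetD_pyRange_zero o ' ']
      rw [PySem.List.combinations_map, List.map_map]
      rfl
    rw [h1]
    refine (map_sortKey_combinations_perm o (sortKey o) c.toNat (sortKey_perm o).symm).trans ?_
    have h2 : ∀ cb ∈ PySem.List.combinations (sortKey o) c.toNat, sortKey cb = cb := by
      intro cb hcb
      exact sortKey_eq_self ((sortKey_pairwise o).sublist (PySem.List.sublist_of_mem_combinations hcb))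
    rw [List.map_congr_left h2]
    exact List.Perm.of_eq (List.map_id _)
  · rw [if_neg hc, if_neg hc]
lemma stream_perm (orders : List String) (course : List Int) :
    (streamA orders course).Perm (streamB orders course) := by
  exact List.Perm.flatMap_left orders (fun od _ =>
    List.Perm.flatMap_left course (fun c _ => chunk_perm od.toList c))

-- ---- PySem.List.dedup utilities ----
lemma dedup_append_singleton {α : Type} [BEq α] [LawfulBEq α] (p : List α) (k : α) :
    PySem.List.dedup (p ++ [k]) = if k ∈ PySem.List.dedup p then PySem.List.dedup p else PySem.List.dedup p ++ [k] := by
  have h : PySem.List.dedup (p ++ [k]) = PySem.Set.add (PySem.List.dedup p) k := by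
    simp [PySem.List.dedup_eq_ofList, PySem.Set.ofList_eq_foldl, List.foldl_append]
  rw [h]
  by_cases hk : k ∈ PySem.List.dedup p
  · simp [PySem.Set.add, PySem.Set.contains]
  · simp [PySem.Set.add, PySem.Set.contains]
lemma dedup_sublist {α : Type} [BEq α] [LawfulBEq α] (p : List α) :
    List.Sublist (PySem.List.dedup p) p := by
  induction p using List.reverseRecOn with
  | nil => simp [PySem.List.dedup_eq_ofList]
  | append_singleton p k ih =>
    rw [dedup_append_singleton]
    by_cases hk : k ∈ PySem.List.dedup p
    · rw [if_pos hk]; exact ih.trans (List.sublist_append_left p [k])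
    · rw [if_neg hk]; exact ih.append (List.Sublist.refl [k])

-- ---- A side: the comb dictionary maps (i, c) to combF (i, c) ----
def GoodComb (d : PySem.Dict (Int × Int) (List (List Int))) : Prop :=
  ∀ k, d.get? k = none ∨ d.get? k = some (combF k)
lemma goodComb_inner (course : List Int) (i : Int) (d : PySem.Dict (Int × Int) (List (List Int)))
    (hd : GoodComb d) :
    GoodComb (course.foldl (fun d c => if c ≤ i then d.insert (i, c) (combF (i, c)) else d) d) := by
  induction course generalizing d with
  | nil => exact hd
  | cons c cs ih =>
    simp only [List.foldl_cons]
    apply ih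
    by_cases hc : c ≤ i
    · rw [if_pos hc]
      intro k
      rw [PySem.Dict.get?_insert]
      by_cases hk : k = (i, c)
      · right; rw [if_pos hk, hk]
      · rw [if_neg hk]; exact hd k
    · rw [if_neg hc]; exact hd
lemma contains_inner_mono (course : List Int) (i : Int) (d : PySem.Dict (Int × Int) (List (List Int)))
    (k : Int × Int) (h : d.contains k = true) :
    ((course.foldl (fun d c => if c ≤ i then d.insert (i, c) (combF (i, c)) else d) d)).contains k = true := by
  induction course generalizing d with
  | nil => exact h
  | cons c cs ih =>
    simp only [List.foldl_cons]
    apply ih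
    by_cases hc : c ≤ i
    · rw [if_pos hc, PySem.Dict.contains_insert, h, Bool.or_true]
    · rw [if_neg hc]; exact h
lemma contains_inner (course : List Int) (i : Int) (d : PySem.Dict (Int × Int) (List (List Int)))
    {c : Int} (hc : c ∈ course) (hle : c ≤ i) :
    ((course.foldl (fun d c => if c ≤ i then d.insert (i, c) (combF (i, c)) else d) d)).contains (i, c) = true := by
  induction course generalizing d with
  | nil => cases hc
  | cons c' cs ih =>
    simp only [List.foldl_cons]
    rcases List.mem_cons.mp hc with h1 | h1
    · subst h1
      apply contains_inner_mono
      rw [if_pos hle]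
      exact PySem.Dict.contains_insert_self _ _ _
    · exact ih _ h1
lemma comb_get? (lens : List Int) (course : List Int) {i c : Int}
    (hi : i ∈ lens) (hc : c ∈ course) (hle : c ≤ i) :
    ((lens.foldl (fun d i =>
        course.foldl (fun d c => if c ≤ i then d.insert (i, c) (combF (i, c)) else d) d)
        PySem.Dict.empty)).get? (i, c) = some (combF (i, c)) := by
  have hgood : GoodComb (lens.foldl (fun d i =>
      course.foldl (fun d c => if c ≤ i then d.insert (i, c) (combF (i, c)) else d) d) PySem.Dict.empty) := by
    have : ∀ (l : List Int) (d : PySem.Dict (Int × Int) (List (List Int))), GoodComb d →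
        GoodComb (l.foldl (fun d i =>
          course.foldl (fun d c => if c ≤ i then d.insert (i, c) (combF (i, c)) else d) d) d) := by
      intro l
      induction l with
      | nil => intro d hd; exact hd
      | cons j js ihl =>
        intro d hd
        simp only [List.foldl_cons]
        exact ihl _ (goodComb_inner course j d hd)
    exact this lens _ (fun k => Or.inl (PySem.Dict.get?_empty k))
  have hcont : ((lens.foldl (fun d i =>
      course.foldl (fun d c => if c ≤ i then d.insert (i, c) (combF (i, c)) else d) d)
      PySem.Dict.empty)).contains (i, c) = true := by
    have hmono : ∀ (l : List Int) (d : PySem.Dict (Int × Int) (List (List Int))) (k : Int × Int),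
        d.contains k = true →
        (l.foldl (fun d i =>
          course.foldl (fun d c => if c ≤ i then d.insert (i, c) (combF (i, c)) else d) d) d).contains k = true := by
      intro l
      induction l with
      | nil => intro d k h; exact h
      | cons j js ihl =>
        intro d k h
        simp only [List.foldl_cons]
        exact ihl _ _ (contains_inner_mono course j d k h)
    have : ∀ (l : List Int) (d : PySem.Dict (Int × Int) (List (List Int))), i ∈ l →
        (l.foldl (fun d i =>
          course.foldl (fun d c => if c ≤ i then d.insert (i, c) (combF (i, c)) else d) d) d).contains (i, c) = true := by
      intro l
      induction l with
      | nil => intro d h; cases h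
      | cons j js ihl =>
        intro d h
        simp only [List.foldl_cons]
        rcases List.mem_cons.mp h with h1 | h1
        · subst h1
          exact hmono js _ _ (contains_inner course i d hc hle)
        · exact ihl _ h1
    exact this lens _ hi
  rcases hgood (i, c) with h | h
  · rw [PySem.Dict.contains_eq_isSome_get?, h] at hcont
    cases hcont
  · exact h

-- ---- A side: the counting loop is the single fold of stepA over streamA ----
def stFinal (orders : List String) (course : List Int) :
    PySem.Dict (List Char) Int × PySem.Dict Int Int :=
  (streamA orders course).foldl stepA (PySem.Dict.empty, PySem.Dict.empty)
def combDict (orders : List String) (course : List Int) : PySem.Dict (Int × Int) (List (List Int)) :=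
  (PySem.Set.ofList ((orders.map String.toList).map (fun o => PySem.List.len o)) : List Int).foldl
    (fun d i => course.foldl (fun d c => if c ≤ i then d.insert (i, c) (combF (i, c)) else d) d)
    PySem.Dict.empty
def nestedSt (orders : List String) (course : List Int) :
    PySem.Dict (List Char) Int × PySem.Dict Int Int :=
  (orders.map String.toList).foldl (fun st o =>
    course.foldl (fun st c =>
      if c ≤ PySem.List.len o then
        (((combDict orders course).get? (PySem.List.len o, c)).getD []).foldl
          (fun st cb => stepA st (sortKey (cb.map (fun j => PySem.List.pyGetD o j ' ')))) st
      else st) st) (PySem.Dict.empty, PySem.Dict.empty)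

lemma nestedSt_eq (orders : List String) (course : List Int) :
    nestedSt orders course = stFinal orders course := by
  unfold nestedSt stFinal streamA
  rw [List.foldl_flatMap]
  rw [List.foldl_map]
  apply PySem.List.foldl_congr_mem
  intro st od hod
  rw [List.foldl_flatMap]
  apply PySem.List.foldl_congr_mem
  intro st' c hc
  by_cases hle : c ≤ PySem.List.len od.toList
  · rw [if_pos hle]
    have hget : (combDict orders course).get? (PySem.List.len od.toList, c)
        = some (combF (PySem.List.len od.toList, c)) := by
      apply comb_get?
      · apply (PySem.Set.mem_ofList _ _).mpr
        exact List.mem_map_of_mem (List.mem_map_of_mem hod)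
      · exact hc
      · exact hle
    rw [hget]
    unfold chunkA combF
    rw [if_pos hle]
    rw [List.foldl_map]
    rfl
  · rw [if_neg hle]
    unfold chunkA
    rw [if_neg hle]
    rfl

lemma solutionA_shape (orders : List String) (course : List Int) :
    solution orders course =
      (sortLL ((stFinal orders course).1.keys.filter
        (fun m => decide (2 ≤ (stFinal orders course).1.getD m 0 ∧
          (stFinal orders course).1.getD m 0 = (stFinal orders course).2.getD (PySem.List.len m) 0)))).map
        (fun cs => String.ofList cs) := by
  have h0 : solution orders course =
      (sortLL ((nestedSt orders course).1.keys.foldl (fun acc m =>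
        if 2 ≤ (nestedSt orders course).1.getD m 0 ∧
           (nestedSt orders course).1.getD m 0 = (nestedSt orders course).2.getD (PySem.List.len m) 0
        then acc ++ [m] else acc) [])).map (fun cs => String.ofList cs) := rfl
  rw [h0, nestedSt_eq]
  rw [PySem.List.foldl_append_ite_eq_filter]
  simp

-- ---- A side: invariant of the counting fold ----
def InvA (p : List (List Char)) (st : PySem.Dict (List Char) Int × PySem.Dict Int Int) : Prop :=
  st.1.keys = PySem.List.dedup p ∧
  (∀ k, st.1.getD k 0 = (p.count k : Int)) ∧
  (∀ n : Int,
    (∀ k ∈ p, PySem.List.len k = n → (p.count k : Int) ≤ st.2.getD n 0) ∧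
    (st.2.getD n 0 = 0 ∨ ∃ k ∈ p, PySem.List.len k = n ∧ st.2.getD n 0 = (p.count k : Int)))
lemma stepA_eq (st : PySem.Dict (List Char) Int × PySem.Dict Int Int) (k : List Char) :
    stepA st k = (st.1.insert k (st.1.getD k 0 + 1),
      if st.1.getD k 0 + 1 > st.2.getD (PySem.List.len k) 0
      then st.2.insert (PySem.List.len k) (st.1.getD k 0 + 1) else st.2) := by
  simp [stepA, PySem.Dict.getD_insert_self]

lemma invA_step (p : List (List Char)) (st : PySem.Dict (List Char) Int × PySem.Dict Int Int)
    (h : InvA p st) (k : List Char) : InvA (p ++ [k]) (stepA st k) := by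
  obtain ⟨mn, mx⟩ := st
  obtain ⟨hkeys, hcnt, hmax⟩ := h
  dsimp only at hkeys hcnt hmax
  rw [stepA_eq]
  unfold InvA
  dsimp only
  simp only [hcnt]
  have hcnt_self : (((p ++ [k]).count k : Nat) : Int) = (p.count k : Int) + 1 := by simp
  have hcnt_ne : ∀ x, x ≠ k → (((p ++ [k]).count x : Nat) : Int) = (p.count x : Int) := by
    intro x hx
    have h1 : (p ++ [k]).count x = p.count x := by simp [List.count_append, List.count_eq_zero, hx]
    exact_mod_cast congrArg (fun n : Nat => (n : Int)) h1
  have hcast : (0 : Int) ≤ (p.count k : Int) := by positivity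
  refine ⟨?_, ?_, ?_⟩
  · rw [dedup_append_singleton]
    by_cases hk : k ∈ p
    · have hc : mn.contains k = true := by
        rw [PySem.Dict.contains_iff_mem_keys, hkeys]
        exact (PySem.List.mem_dedup p k).mpr hk
      rw [PySem.Dict.keys_insert_of_contains mn _ hc, hkeys,
        if_pos ((PySem.List.mem_dedup p k).mpr hk)]
    · have hc : mn.contains k = false := by
        rw [← Bool.not_eq_true, PySem.Dict.contains_iff_mem_keys, hkeys]
        intro hmem
        exact hk ((PySem.List.mem_dedup p k).mp hmem)
      rw [PySem.Dict.keys_insert_of_not_contains mn _ hc, hkeys]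
      rw [if_neg (fun hmem => hk ((PySem.List.mem_dedup p k).mp hmem))]
  · intro x
    rw [PySem.Dict.getD_insert]
    by_cases hx : x = k
    · subst hx
      rw [if_pos rfl, hcnt_self]
    · rw [if_neg hx, hcnt_ne x hx]
      exact hcnt x
  · intro n
    obtain ⟨hi, hii⟩ := hmax n
    by_cases hn : n = PySem.List.len k
    · subst hn
      by_cases hgt : (p.count k : Int) + 1 > mx.getD (PySem.List.len k) 0
      · rw [if_pos hgt]
        constructor
        · intro k' hk' hlen'
          rw [PySem.Dict.getD_insert_self]
          by_cases hx : k' = k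
          · subst hx
            rw [hcnt_self]
          · rcases List.mem_append.mp hk' with hm | hm
            · rw [hcnt_ne k' hx]
              exact le_trans (hi k' hm hlen') (by omega)
            · exact absurd (List.mem_singleton.mp hm) hx
        · refine Or.inr ⟨k, by simp, rfl, ?_⟩
          rw [PySem.Dict.getD_insert_self, hcnt_self]
      · rw [if_neg hgt]
        rw [not_lt] at hgt
        constructor
        · intro k' hk' hlen'
          by_cases hx : k' = k
          · subst hx
            rw [hcnt_self]
            exact hgt
          · rcases List.mem_append.mp hk' with hm | hm
            · rw [hcnt_ne k' hx]
              exact hi k' hm hlen'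
            · exact absurd (List.mem_singleton.mp hm) hx
        · rcases hii with h0 | ⟨k', hk', hlen', hval⟩
          · exfalso
            omega
          · have hxk : k' ≠ k := by
              intro hx
              subst hx
              omega
            exact Or.inr ⟨k', List.mem_append_left _ hk', hlen', by rw [hval, hcnt_ne k' hxk]⟩
    · have hval : (if (p.count k : Int) + 1 > mx.getD (PySem.List.len k) 0
          then mx.insert (PySem.List.len k) ((p.count k : Int) + 1) else mx).getD n 0 = mx.getD n 0 := by
        by_cases hgt : (p.count k : Int) + 1 > mx.getD (PySem.List.len k) 0
        · rw [if_pos hgt, PySem.Dict.getD_insert, if_neg hn]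
        · rw [if_neg hgt]
      rw [hval]
      constructor
      · intro k' hk' hlen'
        have hx : k' ≠ k := by
          intro hx
          subst hx
          exact hn hlen'.symm
        rcases List.mem_append.mp hk' with hm | hm
        · rw [hcnt_ne k' hx]
          exact hi k' hm hlen'
        · exact absurd (List.mem_singleton.mp hm) hx
      · rcases hii with h0 | ⟨k', hk', hlen', hval'⟩
        · exact Or.inl h0
        · have hx : k' ≠ k := by
            intro hx
            subst hx
            exact hn hlen'.symm
          exact Or.inr ⟨k', List.mem_append_left _ hk', hlen', by rw [hval', hcnt_ne k' hx]⟩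

lemma invA_fold (ks : List (List Char)) (p : List (List Char))
    (st : PySem.Dict (List Char) Int × PySem.Dict Int Int) (h : InvA p st) :
    InvA (p ++ ks) (ks.foldl stepA st) := by
  induction ks generalizing p st with
  | nil => simpa using h
  | cons k t ih =>
    simp only [List.foldl_cons]
    have h2 := ih (p ++ [k]) (stepA st k) (invA_step p st h k)
    simpa [List.append_assoc] using h2

lemma invA_stream (sA : List (List Char)) :
    InvA sA (sA.foldl stepA (PySem.Dict.empty, PySem.Dict.empty)) := by
  have h0 : InvA [] (PySem.Dict.empty, PySem.Dict.empty) := by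
    refine ⟨?_, ?_, ?_⟩
    · simp [PySem.Dict.keys_empty, PySem.List.dedup_eq_ofList, PySem.Set.ofList]
    · intro k
      simp [PySem.Dict.getD_empty]
    · intro n
      exact ⟨fun k hk => absurd hk (List.not_mem_nil), Or.inl (PySem.Dict.getD_empty n 0)⟩
  simpa using invA_fold sA [] _ h0

-- ---- B side: shape of the port ----
lemma altB_shape (orders : List String) (course : List Int) :
    solution_alt orders course =
      ((((ksort (streamB orders course)).foldl stepR []).filter
        (fun p : List Char × Int => decide (2 ≤ p.2 ∧ p.2 =
          (((ksort (streamB orders course)).foldl stepR []).foldl stepBest PySem.Dict.empty).getD (PySem.List.len p.1) 0))).map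
        (fun p => p.1)).map (fun cs => String.ofList cs) := by
  have hkeys : (orders.foldl (fun acc od =>
      course.foldl (fun acc c =>
        if c ≤ PySem.List.len (sortKey od.toList)
        then acc ++ PySem.List.combinations (sortKey od.toList) c.toNat else acc) acc)
      ([] : List (List Char)))
      = streamB orders course := by
    unfold streamB
    have h1 : ∀ (od : String) (acc : List (List Char)),
        course.foldl (fun acc c =>
          if c ≤ PySem.List.len (sortKey od.toList)
          then acc ++ PySem.List.combinations (sortKey od.toList) c.toNat else acc) acc
        = acc ++ course.flatMap (fun c => chunkB od.toList c) := by
      intro od acc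
      rw [← PySem.List.foldl_append_eq_flatMap]
      apply PySem.List.foldl_congr_mem
      intro acc' c _
      unfold chunkB
      by_cases hle : c ≤ PySem.List.len (sortKey od.toList)
      · rw [if_pos hle, if_pos hle]
      · rw [if_neg hle, if_neg hle, List.append_nil]
    calc orders.foldl (fun acc od =>
          course.foldl (fun acc c =>
            if c ≤ PySem.List.len (sortKey od.toList)
            then acc ++ PySem.List.combinations (sortKey od.toList) c.toNat else acc) acc) []
        = orders.foldl (fun acc od => acc ++ course.flatMap (fun c => chunkB od.toList c)) [] := by
          apply PySem.List.foldl_congr_mem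
          intro acc od _
          exact h1 od acc
      _ = [] ++ orders.flatMap (fun od => course.flatMap (fun c => chunkB od.toList c)) :=
          PySem.List.foldl_append_eq_flatMap _ _ _
      _ = orders.flatMap (fun od => course.flatMap (fun c => chunkB od.toList c)) := by simp
  have h0 : solution_alt orders course =
      ((((ksort (orders.foldl (fun acc od =>
          course.foldl (fun acc c =>
            if c ≤ PySem.List.len (sortKey od.toList)
            then acc ++ PySem.List.combinations (sortKey od.toList) c.toNat else acc) acc)
          ([] : List (List Char)))).foldl stepR []).filter
        (fun p : List Char × Int => decide (2 ≤ p.2 ∧ p.2 =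
          (((ksort (orders.foldl (fun acc od =>
            course.foldl (fun acc c =>
              if c ≤ PySem.List.len (sortKey od.toList)
              then acc ++ PySem.List.combinations (sortKey od.toList) c.toNat else acc) acc)
            ([] : List (List Char)))).foldl stepR []).foldl stepBest PySem.Dict.empty).getD (PySem.List.len p.1) 0))).map
        (fun p => p.1)).map (fun cs => String.ofList cs) := rfl
  rw [h0, hkeys]

-- ---- B side: run-length encoding of a ≤-sorted list ----
lemma runs_eq (s p : List (List Char)) (hsort : (p ++ s).Pairwise (· ≤ ·)) :
    s.foldl stepR ((PySem.List.dedup p).map (fun k => (k, (p.count k : Int)))) =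
      (PySem.List.dedup (p ++ s)).map (fun k => (k, ((p ++ s).count k : Int))) := by
  induction s generalizing p with
  | nil => simp
  | cons k t ih =>
    have hassoc : p ++ k :: t = (p ++ [k]) ++ t := by simp
    simp only [List.foldl_cons]
    have hple : ∀ y ∈ p, y ≤ k := by
      intro y hy
      exact (List.pairwise_append.mp hsort).2.2 y hy k (List.mem_cons_self)
    have hpair : p.Pairwise (· ≤ ·) := (List.pairwise_append.mp hsort).1
    have hdpair : (PySem.List.dedup p).Pairwise (· ≤ ·) := hpair.sublist (dedup_sublist p)
    have hcnt_self : (((p ++ [k]).count k : Nat) : Int) = (p.count k : Int) + 1 := by simp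
    have hcnt_ne : ∀ x, x ≠ k → (((p ++ [k]).count x : Nat) : Int) = (p.count x : Int) := by
      intro x hx
      have h1 : (p ++ [k]).count x = p.count x := by simp [List.count_append, List.count_eq_zero, hx]
      exact_mod_cast congrArg (fun n : Nat => (n : Int)) h1
    have hstep : stepR ((PySem.List.dedup p).map (fun x => (x, (p.count x : Int)))) k
        = (PySem.List.dedup (p ++ [k])).map (fun x => (x, ((p ++ [k]).count x : Int))) := by
      rcases List.eq_nil_or_concat' (PySem.List.dedup p) with hD | ⟨D, d, hD⟩
      · have hp : p = [] := by
          cases p with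
          | nil => rfl
          | cons x xs =>
            exfalso
            have hx : x ∈ PySem.List.dedup (x :: xs) := (PySem.List.mem_dedup _ _).mpr List.mem_cons_self
            rw [hD] at hx
            exact absurd hx (List.not_mem_nil)
        subst hp
        simp [stepR, PySem.List.dedup_eq_ofList, PySem.Set.ofList]
      · have hd_mem : d ∈ p := by
          have hx : d ∈ PySem.List.dedup p := by rw [hD]; simp
          exact (PySem.List.mem_dedup p d).mp hx
        have hDlast : ∀ x ∈ PySem.List.dedup p, x ≤ d := by
          intro x hx
          rw [hD] at hx hdpair
          rcases List.mem_append.mp hx with hm | hm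
          · exact (List.pairwise_append.mp hdpair).2.2 x hm d (List.mem_singleton_self d)
          · rw [List.mem_singleton.mp hm]
        have hnodup : (PySem.List.dedup p).Nodup := PySem.List.nodup_dedup p
        have hmemded : ∀ x ∈ PySem.List.dedup p, x ∈ p := fun x hx => (PySem.List.mem_dedup p x).mp hx
        rw [hD, List.map_append]
        simp only [stepR, List.map_cons, List.map_nil, List.getLast?_concat]
        by_cases hk : d = k
        · subst hk
          have hdd : PySem.List.dedup (p ++ [d]) = PySem.List.dedup p := by
            rw [dedup_append_singleton, if_pos ((PySem.List.mem_dedup p d).mpr hd_mem)]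
          have hdD : d ∉ D := by
            rw [hD] at hnodup
            intro hm
            rw [List.nodup_append] at hnodup
            exact hnodup.2.2 d hm d (List.mem_singleton_self d) rfl
          rw [if_pos rfl, List.dropLast_concat, hdd, hD, List.map_append]
          congr 1
          · apply List.map_congr_left
            intro x hx
            have hxd : x ≠ d := fun h => hdD (h ▸ hx)
            rw [Prod.mk.injEq]
            exact ⟨rfl, (hcnt_ne x hxd).symm⟩
          · simp only [List.map_cons, List.map_nil]
            rw [hcnt_self]
        · have hknp : k ∉ p := by
            intro hkp
            have hk1 : k ∈ PySem.List.dedup p := (PySem.List.mem_dedup p k).mpr hkp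
            have h1 : k ≤ d := hDlast k hk1
            have h2 : d ≤ k := hple d hd_mem
            exact hk (le_antisymm h2 h1)
          have hdd : PySem.List.dedup (p ++ [k]) = PySem.List.dedup p ++ [k] := by
            rw [dedup_append_singleton,
              if_neg (fun hmem => hknp ((PySem.List.mem_dedup p k).mp hmem))]
          rw [if_neg hk, hdd, hD, List.map_append, List.map_append]
          simp only [List.append_assoc]
          congr 1
          · apply List.map_congr_left
            intro x hx
            have hxk : x ≠ k := by
              intro h
              exact hknp (hmemded x (by rw [hD]; exact List.mem_append_left _ hx) |> (h ▸ ·))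
            rw [Prod.mk.injEq]
            exact ⟨rfl, (hcnt_ne x hxk).symm⟩
          · have hck : (((p ++ [k]).count k : Nat) : Int) = 1 := by
              rw [hcnt_self, List.count_eq_zero.mpr hknp]
              simp
            simp only [List.map_cons, List.map_nil, List.cons_append, List.nil_append]
            rw [hcnt_ne d hk, hck]
    rw [hstep, hassoc]
    exact ih (p ++ [k]) (hassoc ▸ hsort)

def BestFacts (rs : List (List Char × Int)) (b : PySem.Dict Int Int) : Prop :=
  ∀ n : Int,
    (∀ q ∈ rs, PySem.List.len q.1 = n → q.2 ≤ b.getD n 0) ∧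
    (b.getD n 0 = 0 ∨ ∃ q ∈ rs, PySem.List.len q.1 = n ∧ b.getD n 0 = q.2)

lemma bestStep_facts (rs : List (List Char × Int)) (b : PySem.Dict Int Int)
    (h : BestFacts rs b) (q : List Char × Int) : BestFacts (rs ++ [q]) (stepBest b q) := by
  intro n
  obtain ⟨hi, hii⟩ := h n
  unfold stepBest
  by_cases hn : n = PySem.List.len q.1
  · subst hn
    by_cases hgt : q.2 > b.getD (PySem.List.len q.1) 0
    · rw [if_pos hgt]
      constructor
      · intro q' hq' hlen'
        rw [PySem.Dict.getD_insert_self]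
        rcases List.mem_append.mp hq' with hm | hm
        · exact le_trans (hi q' hm hlen') (le_of_lt hgt)
        · rw [List.mem_singleton.mp hm]
      · exact Or.inr ⟨q, by simp, rfl, by rw [PySem.Dict.getD_insert_self]⟩
    · rw [if_neg hgt]
      constructor
      · intro q' hq' hlen'
        rcases List.mem_append.mp hq' with hm | hm
        · exact hi q' hm hlen'
        · rw [List.mem_singleton.mp hm]
          omega
      · rcases hii with h0 | ⟨q', hq', hlen', hval⟩
        · exact Or.inl h0
        · exact Or.inr ⟨q', List.mem_append_left _ hq', hlen', hval⟩
  · have hval : (if q.2 > b.getD (PySem.List.len q.1) 0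
        then b.insert (PySem.List.len q.1) q.2 else b).getD n 0 = b.getD n 0 := by
      by_cases hgt : q.2 > b.getD (PySem.List.len q.1) 0
      · rw [if_pos hgt, PySem.Dict.getD_insert, if_neg hn]
      · rw [if_neg hgt]
    rw [hval]
    constructor
    · intro q' hq' hlen'
      rcases List.mem_append.mp hq' with hm | hm
      · exact hi q' hm hlen'
      · rw [List.mem_singleton.mp hm] at hlen'
        exact absurd hlen'.symm hn
    · rcases hii with h0 | ⟨q', hq', hlen', hval'⟩
      · exact Or.inl h0
      · exact Or.inr ⟨q', List.mem_append_left _ hq', hlen', hval'⟩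

lemma bestFacts_fold (rs : List (List Char × Int)) :
    BestFacts rs (rs.foldl stepBest PySem.Dict.empty) := by
  have hgen : ∀ (l pfx : List (List Char × Int)) (b : PySem.Dict Int Int), BestFacts pfx b →
      BestFacts (pfx ++ l) (l.foldl stepBest b) := by
    intro l
    induction l with
    | nil => intro pfx b h; simpa using h
    | cons q t iht =>
      intro pfx b h
      simp only [List.foldl_cons]
      have h2 := iht (pfx ++ [q]) (stepBest b q) (bestStep_facts pfx b h q)
      simpa [List.append_assoc] using h2
  have h0 : BestFacts [] PySem.Dict.empty := by
    intro n
    exact ⟨fun q hq => absurd hq (List.not_mem_nil), Or.inl (PySem.Dict.getD_empty n 0)⟩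
  simpa using hgen rs [] PySem.Dict.empty h0

lemma max_unique (s : List (List Char)) (n : Int) (v w : Int)
    (hv1 : ∀ k ∈ s, PySem.List.len k = n → (s.count k : Int) ≤ v)
    (hv2 : v = 0 ∨ ∃ k ∈ s, PySem.List.len k = n ∧ v = (s.count k : Int))
    (hw1 : ∀ k ∈ s, PySem.List.len k = n → (s.count k : Int) ≤ w)
    (hw2 : w = 0 ∨ ∃ k ∈ s, PySem.List.len k = n ∧ w = (s.count k : Int)) : v = w := by
  have hpos : ∀ k ∈ s, (1 : Int) ≤ (s.count k : Nat) := by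
    intro k hk
    have h1 := List.count_pos_iff.mpr hk
    exact_mod_cast h1
  rcases hv2 with hv | ⟨k1, hk1, hl1, hv⟩ <;> rcases hw2 with hw | ⟨k2, hk2, hl2, hw⟩
  · omega
  · have h1 := hv1 k2 hk2 hl2
    have h2 := hpos k2 hk2
    omega
  · have h1 := hw1 k1 hk1 hl1
    have h2 := hpos k1 hk1
    omega
  · have h1 := hv1 k2 hk2 hl2
    have h2 := hw1 k1 hk1 hl1
    omega

-- ===== VERDICT (by name: the statement is the Claim_ definition above) =====
theorem solution_spec : Claim_equal_solution := by
  intro orders course hdom hpre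
  unfold Spec_solution
  rw [solutionA_shape, altB_shape]
  obtain ⟨hkeysA, hcntA, hmaxA⟩ := invA_stream (streamA orders course)
  have hkeysA : (stFinal orders course).1.keys = PySem.List.dedup (streamA orders course) := hkeysA
  have hcntA : ∀ k : List Char, (stFinal orders course).1.getD k 0
      = ((streamA orders course).count k : Int) := hcntA
  have hmaxA : ∀ n : Int,
      (∀ k ∈ streamA orders course, PySem.List.len k = n →
        ((streamA orders course).count k : Int) ≤ (stFinal orders course).2.getD n 0) ∧
      ((stFinal orders course).2.getD n 0 = 0 ∨ ∃ k ∈ streamA orders course,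
        PySem.List.len k = n ∧ (stFinal orders course).2.getD n 0 = ((streamA orders course).count k : Int)) := hmaxA
  have hperm : (streamA orders course).Perm (streamB orders course) := stream_perm orders course
  have hpermS : (ksort (streamB orders course)).Perm (streamA orders course) :=
    (ksort_perm _).trans hperm.symm
  have hcntEqI : ∀ k : List Char,
      (((ksort (streamB orders course)).count k : Nat) : Int) = ((streamA orders course).count k : Int) := by
    intro k
    rw [hpermS.count_eq]
  have hmemEq : ∀ k : List Char, k ∈ ksort (streamB orders course) ↔ k ∈ streamA orders course :=
    fun k => hpermS.mem_iff
  have hruns : (ksort (streamB orders course)).foldl stepR []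
      = (PySem.List.dedup (ksort (streamB orders course))).map
          (fun k => (k, ((ksort (streamB orders course)).count k : Int))) := by
    have h1 := runs_eq (ksort (streamB orders course)) [] (by simpa using ksort_pairwise (streamB orders course))
    simpa using h1
  have hbest := bestFacts_fold ((PySem.List.dedup (ksort (streamB orders course))).map
      (fun k => (k, ((ksort (streamB orders course)).count k : Int))))
  have hmaxEq : ∀ n : Int, (stFinal orders course).2.getD n 0
      = (((PySem.List.dedup (ksort (streamB orders course))).map
          (fun k => (k, ((ksort (streamB orders course)).count k : Int)))).foldl stepBest PySem.Dict.empty).getD n 0 := by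
    intro n
    obtain ⟨hA1, hA2⟩ := hmaxA n
    obtain ⟨hB1, hB2⟩ := hbest n
    apply max_unique (streamA orders course) n
    · exact hA1
    · exact hA2
    · intro k hk hlen
      have hkD : k ∈ PySem.List.dedup (ksort (streamB orders course)) :=
        (PySem.List.mem_dedup _ k).mpr ((hmemEq k).mpr hk)
      have h2 := hB1 (k, ((ksort (streamB orders course)).count k : Int))
        (List.mem_map_of_mem hkD) hlen
      rwa [hcntEqI k] at h2
    · rcases hB2 with h0 | ⟨q, hq, hlen, hval⟩
      · exact Or.inl h0
      · obtain ⟨k, hkD, rfl⟩ := List.mem_map.mp hq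
        refine Or.inr ⟨k, (hmemEq k).mp ((PySem.List.mem_dedup _ k).mp hkD), hlen, ?_⟩
        rw [hval, ← hcntEqI k]
  -- the two winner lists coincide
  congr 1
  rw [hkeysA, hruns, List.filter_map, List.map_map]
  have hfst : ((fun p : List Char × Int => p.1) ∘
      (fun k => (k, ((ksort (streamB orders course)).count k : Int)))) = id := rfl
  rw [hfst, List.map_id]
  apply sortLL_eq_of_perm_of_pairwise_lt
  · -- permutation of the two nodup filtered lists
    refine (List.perm_ext_iff_of_nodup ((PySem.List.nodup_dedup _).filter _)
      ((PySem.List.nodup_dedup _).filter _)).mpr ?_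
    intro x
    rw [List.mem_filter, List.mem_filter]
    dsimp only [Function.comp_apply]
    have hmemD : x ∈ PySem.List.dedup (ksort (streamB orders course)) ↔
        x ∈ PySem.List.dedup (streamA orders course) := by
      rw [PySem.List.mem_dedup, PySem.List.mem_dedup]
      exact hmemEq x
    have hpredEq :
        (decide (2 ≤ (((ksort (streamB orders course)).count x : Nat) : Int) ∧
          (((ksort (streamB orders course)).count x : Nat) : Int) =
          (((PySem.List.dedup (ksort (streamB orders course))).map
            (fun k => (k, ((ksort (streamB orders course)).count k : Int)))).foldl stepBest PySem.Dict.empty).getD (PySem.List.len x) 0))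
        = decide (2 ≤ (stFinal orders course).1.getD x 0 ∧
          (stFinal orders course).1.getD x 0 = (stFinal orders course).2.getD (PySem.List.len x) 0) := by
      rw [hcntEqI x, ← hcntA x, ← hmaxEq (PySem.List.len x)]
    constructor
    · rintro ⟨hm, hp⟩
      refine ⟨hmemD.mp hm, ?_⟩
      rw [← hpredEq]
      exact hp
    · rintro ⟨hm, hp⟩
      refine ⟨hmemD.mpr hm, ?_⟩
      rw [hpredEq]
      exact hp
  · -- strictly increasing
    have h1 : (PySem.List.dedup (ksort (streamB orders course))).Pairwise (· ≤ ·) :=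
      (ksort_pairwise _).sublist (dedup_sublist _)
    have h2 : (PySem.List.dedup (ksort (streamB orders course))).Pairwise (· ≠ ·) :=
      PySem.List.nodup_dedup _
    have h3 : (PySem.List.dedup (ksort (streamB orders course))).Pairwise (· < ·) :=
      (h1.and h2).imp (fun hab => lt_of_le_of_ne hab.1 hab.2)
    exact h3.filter _
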